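-- pv_equiv track=rewrite | github.com/tishchennko/EGE | 25 задание ЕГЭ/another type/task-25.3025.py | f
-- ===== SOURCE A (Python) =====
-- def f(num):
--     res = set()
--     for i in range(2, int(num ** 0.5) + 1):
--         if num % i == 0:
--             if i % 2 != 0:
--                 res |= {i}
--             if num // i % 2 != 0:
--                 res |= {num // i}
--     res = sorted(res)
--
--     if len(res) <= 5:
--         return 0
--     if len(res) >= 6:
--         return res[-6]
-- ===== SOURCE B (Python) =====
-- def f(num):
--     # Factorise the odd part of num, generate all its divisors from the
--     # factorisation, keep those in [3, num//2], and pick the 6th largest.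
--     m = num
--     while m % 2 == 0 and m > 0:
--         m //= 2
--     fac = []
--     p = 3
--     while p * p <= m:
--         if m % p == 0:
--             e = 0
--             while m % p == 0:
--                 m //= p
--                 e += 1
--             fac.append((p, e))
--         p += 2
--     if m > 1:
--         fac.append((m, 1))
--     divs = [1]
--     for p, e in fac:
--         new = []
--         for d in divs:
--             x = d
--             for _ in range(e + 1):
--                 new.append(x)
--                 x *= p
--         divs = new
--     divs = sorted(d for d in divs if 3 <= d <= num // 2)
--     if len(divs) < 6:
--         return 0
--     return divs[-6]
-- ===== Notes on version B (the rewrite author's own statement) =====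
-- stated objective: alternative
-- what changed: Instead of pairing each trial divisor with its cofactor into a set and sorting, B factorises the odd part of num by trial division, multiplies the factorisation out into the full list of its divisors, and filters that list to [3, num//2] before sorting and taking the 6th largest.
-- crash fix: On num < 0, A raises TypeError (int() of the complex value num**0.5) while B finds no factors and no divisors in [3, num//2] and returns zero. — e.g. on f(-5): A raises TypeError, B returns 0
import Mathlib
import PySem

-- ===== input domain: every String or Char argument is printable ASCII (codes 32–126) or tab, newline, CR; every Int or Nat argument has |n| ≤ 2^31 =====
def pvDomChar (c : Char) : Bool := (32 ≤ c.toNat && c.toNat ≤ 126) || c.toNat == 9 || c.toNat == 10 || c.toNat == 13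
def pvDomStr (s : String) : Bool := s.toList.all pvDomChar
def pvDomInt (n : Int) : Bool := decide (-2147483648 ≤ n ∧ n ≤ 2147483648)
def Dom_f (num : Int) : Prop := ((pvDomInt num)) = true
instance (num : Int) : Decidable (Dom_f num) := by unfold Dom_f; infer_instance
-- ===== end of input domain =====

-- B factorises the odd part of num by trial division, multiplies the factorisation out into
-- the list of all its divisors and filters that to [3, num//2] (objective: alternative).

-- ===== PORT A =====
-- loop body of A's 'for i in range(2, int(num**0.5)+1)'
def fStep (num : Int) (res : PySem.Set Int) (i : Int) : PySem.Set Int :=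
  if PySem.Int.mod num i = 0 then
    let res1 := if PySem.Int.mod i 2 ≠ 0 then PySem.Set.union res [i] else res
    if PySem.Int.mod (PySem.Int.floordiv num i) 2 ≠ 0 then
      PySem.Set.union res1 [PySem.Int.floordiv num i]
    else res1
  else res

-- int(num ** 0.5) is ported as Int.sqrt: exact for 0 ≤ num ≤ 2^31 (i.e. on Dom_f ∧ Pre_f;
-- float sqrt is correctly rounded there, verified against CPython over the whole range).
def f (num : Int) : Int :=
  let res : PySem.Set Int :=
    (PySem.List.pyRange 2 (Int.sqrt num + 1) 1).foldl (fStep num) PySem.Set.empty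
  let res := PySem.List.sorted res (fun x => x) false
  if (res.length : Int) ≤ 5 then 0
  else if 6 ≤ (res.length : Int) then PySem.List.pyGetD res (-6) 0
  else 0  -- unreachable (len ≥ 6 whenever len ≤ 5 fails); Python would fall off returning None

-- ===== PORT B =====
-- 'while m % 2 == 0 and m > 0: m //= 2' (fuel makes the same loop total; it is never exhausted)
def bHalve (m : Int) : Nat → Int
  | 0 => m
  | fuel + 1 =>
    if PySem.Int.mod m 2 = 0 ∧ 0 < m then bHalve (PySem.Int.floordiv m 2) fuel else m

-- inner 'while m % p == 0: m //= p; e += 1', returning (e, m)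
def bExtract (p : Int) : Int → Int → Nat → Int × Int
  | m, e, 0 => (e, m)
  | m, e, fuel + 1 =>
    if PySem.Int.mod m p = 0 then bExtract p (PySem.Int.floordiv m p) (e + 1) fuel else (e, m)

-- 'while p * p <= m: … p += 2', returning (fac, m)
def bFacLoop : Int → Int → List (Int × Int) → Nat → List (Int × Int) × Int
  | _, m, fac, 0 => (fac, m)
  | p, m, fac, fuel + 1 =>
    if p * p ≤ m then
      if PySem.Int.mod m p = 0 then
        let em := bExtract p m 0 m.toNat
        bFacLoop (p + 2) em.2 (fac ++ [(p, em.1)]) fuel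
      else bFacLoop (p + 2) m fac fuel
    else (fac, m)

-- 'for p, e in fac: new = []; for d in divs: x = d; for _ in range(e+1): new.append(x); x *= p'
def bGen (fac : List (Int × Int)) : List Int :=
  fac.foldl (fun divs pe =>
    divs.foldl (fun new d =>
      ((PySem.List.pyRange 0 (pe.2 + 1) 1).foldl
        (fun st _ => (st.1 ++ [st.2], st.2 * pe.1)) (new, d)).1) []) [1]

def f_alt (num : Int) : Int :=
  let m := bHalve num (num.toNat + 1)
  let fr := bFacLoop 3 m [] (m.toNat + 1)
  let fac := if 1 < fr.2 then fr.1 ++ [(fr.2, (1 : Int))] else fr.1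
  let divs := PySem.List.sorted
    ((bGen fac).filter (fun d => decide (3 ≤ d ∧ d ≤ PySem.Int.floordiv num 2)))
    (fun x => x) false
  if (divs.length : Int) < 6 then 0
  else PySem.List.pyGetD divs (-6) 0

-- ===== PRECONDITION & SPEC =====
-- Pre_f excludes num < 0, where A raises TypeError (int() of the complex value num ** 0.5).
def Pre_f (num : Int) : Prop := 0 ≤ num
instance (num : Int) : Decidable (Pre_f num) := by unfold Pre_f; infer_instance
def pvWitness_f : Int := 720

-- On num < 0, A raises TypeError (int() of the complex num**0.5) while B finds no factors and returns zero.
def Raises_f (num : Int) : Prop := num < 0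
instance (num : Int) : Decidable (Raises_f num) := by unfold Raises_f; infer_instance
def pvRaiseWitness_f : Int := -5
def pvRaiseWitnessOut_f : Int := 0

def Spec_f (num : Int) (out : Int) : Prop := out = f_alt num
instance (num : Int) (out : Int) : Decidable (Spec_f num out) := by unfold Spec_f; infer_instance

-- ===== CLAIM (what is proved, stated in full; the proofs are below) =====
def Claim_equal_f : Prop := ∀ (num : Int), Dom_f num → Pre_f num → Spec_f num (f num)
def Claim_raises_f : Prop := (∀ (num : Int), Dom_f num → Raises_f num → ¬ Pre_f num) ∧
  (Dom_f (pvRaiseWitness_f) ∧ Raises_f (pvRaiseWitness_f) ∧ f_alt (pvRaiseWitness_f) = pvRaiseWitnessOut_f)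

-- ===== LEMMAS AND PROOFS =====

theorem le_sqrt_iff (n m : Int) (hn : 0 ≤ n) (hm : 0 ≤ m) : m ≤ Int.sqrt n ↔ m * m ≤ n := by
  obtain ⟨a, rfl⟩ := Int.eq_ofNat_of_zero_le hm
  obtain ⟨b, rfl⟩ := Int.eq_ofNat_of_zero_le hn
  have : Int.sqrt (b : Int) = ((Nat.sqrt b : Nat) : Int) := by simp [Int.sqrt]
  rw [this]
  exact_mod_cast @Nat.le_sqrt a b

-- what one iteration of A's loop can put into the set
def hitP (num i x : Int) : Prop :=
  PySem.Int.mod num i = 0 ∧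
    ((PySem.Int.mod i 2 ≠ 0 ∧ x = i) ∨
     (PySem.Int.mod (PySem.Int.floordiv num i) 2 ≠ 0 ∧ x = PySem.Int.floordiv num i))

theorem mem_fStep (num : Int) (s : PySem.Set Int) (i x : Int) :
    x ∈ fStep num s i ↔ x ∈ s ∨ hitP num i x := by
  unfold fStep hitP
  split_ifs with h1 h2 h3 <;>
    (try simp only [PySem.Set.mem_union, List.mem_cons, List.not_mem_nil, or_false]) <;> tauto

theorem mem_foldl_fStep (num : Int) (l : List Int) (s : PySem.Set Int) (x : Int) :
    x ∈ l.foldl (fStep num) s ↔ x ∈ s ∨ ∃ i ∈ l, hitP num i x := by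
  induction l generalizing s with
  | nil => simp
  | cons i l ih =>
    rw [List.foldl_cons, ih, mem_fStep]
    simp only [List.mem_cons]
    constructor
    · rintro ((h | h) | ⟨j, hj, hh⟩)
      · exact Or.inl h
      · exact Or.inr ⟨i, Or.inl rfl, h⟩
      · exact Or.inr ⟨j, Or.inr hj, hh⟩
    · rintro (h | ⟨j, (rfl | hj), hh⟩)
      · exact Or.inl (Or.inl h)
      · exact Or.inl (Or.inr hh)
      · exact Or.inr ⟨j, hj, hh⟩

theorem nodup_fStep (num : Int) (s : PySem.Set Int) (i : Int) (h : s.Nodup) :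
    (fStep num s i).Nodup := by
  unfold fStep
  split_ifs <;>
    first
      | exact h
      | exact PySem.Set.nodup_union _ _ h
      | exact PySem.Set.nodup_union _ _ (PySem.Set.nodup_union _ _ h)

theorem nodup_foldl_fStep (num : Int) (l : List Int) (s : PySem.Set Int) (h : s.Nodup) :
    (l.foldl (fStep num) s).Nodup := by
  induction l generalizing s with
  | nil => exact h
  | cons i l ih => exact ih _ (nodup_fStep num s i h)

-- B's list, named for the proofs
def bList (num : Int) : List Int :=
  (PySem.List.pyRange 3 (PySem.Int.floordiv num 2 + 1) 2).filter
    (fun d => decide (PySem.Int.mod num d = 0))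

theorem pairwise_pyRange_two (a b : Int) :
    (PySem.List.pyRange a b 2).Pairwise (· < ·) := by
  rw [PySem.List.pyRange_of_pos a b (by norm_num : (0:Int) < 2), List.pairwise_map]
  exact List.pairwise_lt_range.imp (fun {x y} h => by omega)

theorem pairwise_bList (num : Int) : (bList num).Pairwise (· < ·) :=
  (pairwise_pyRange_two 3 _).filter _

-- divisor arithmetic: for 2 ≤ i, i*i ≤ num, i ∣ num the cofactor c = num//i
-- satisfies i*c = num, i ≤ c and num ≤ c*c
theorem cof_facts (num i : Int) (h2 : 2 ≤ i) (hii : i * i ≤ num)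
    (hdvd : PySem.Int.mod num i = 0) :
    i * PySem.Int.floordiv num i = num ∧ i ≤ PySem.Int.floordiv num i ∧
      num ≤ PySem.Int.floordiv num i * PySem.Int.floordiv num i := by
  rw [PySem.Int.mod_eq_zero_iff_dvd] at hdvd
  rw [PySem.Int.floordiv_eq_ediv_of_pos (by omega)]
  have hc : i * (num / i) = num := Int.mul_ediv_cancel' hdvd
  have hic : i ≤ num / i := le_of_mul_le_mul_left (by omega : i * i ≤ i * (num / i)) (by omega)
  have hcc : (num / i) * i ≤ (num / i) * (num / i) :=
    mul_le_mul_of_nonneg_left hic (by omega)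
  have hci : (num / i) * i = i * (num / i) := mul_comm _ _
  exact ⟨hc, hic, by omega⟩

-- membership: B's flat odd scan collects exactly what A's loop puts into the set
theorem mem_bList_iff (num x : Int) (hn : 0 ≤ num) :
    x ∈ bList num ↔ ∃ i ∈ PySem.List.pyRange 2 (Int.sqrt num + 1) 1, hitP num i x := by
  unfold bList hitP
  rw [List.mem_filter]
  simp only [PySem.List.mem_pyRange_iff_of_pos (by norm_num : (0:Int) < 2),
    PySem.List.mem_pyRange_one, decide_eq_true_iff,
    PySem.Int.floordiv_eq_ediv_of_pos (by norm_num : (0:Int) < 2)]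
  constructor
  · rintro ⟨⟨h3, hlt, hpar⟩, hdvd⟩
    have hxd : x ∣ num := (PySem.Int.mod_eq_zero_iff_dvd num x).mp hdvd
    have h2x : 2 * x ≤ num := by
      have := (Int.le_ediv_iff_mul_le (by norm_num : (0:Int) < 2)).mp
        (by omega : x ≤ num / 2)
      omega
    have hcx : x * (num / x) = num := Int.mul_ediv_cancel' hxd
    have hc2 : 2 ≤ num / x := by
      by_contra hlt2
      have h0 : 0 ≤ num / x := Int.ediv_nonneg hn (by omega)
      have : x * (num / x) ≤ x * 1 := mul_le_mul_of_nonneg_left (by omega) (by omega)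
      omega
    have hxodd : ¬ (2 ∣ x) := by omega
    by_cases hcase : x * x ≤ num
    · have hxs : x ≤ Int.sqrt num := (le_sqrt_iff num x hn (by omega)).mpr hcase
      refine ⟨x, ⟨by omega, by omega⟩, hdvd, Or.inl ⟨?_, rfl⟩⟩
      rw [Ne, PySem.Int.mod_eq_zero_iff_dvd]; exact hxodd
    · have hclt : num / x < x := by
        refine lt_of_mul_lt_mul_left (a := x) (by omega) (by omega)
      have hcc : (num / x) * (num / x) ≤ num := by
        have h1 : (num / x) * (num / x) ≤ (num / x) * x :=
          mul_le_mul_of_nonneg_left (by omega) (by omega)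
        have h2 : (num / x) * x = x * (num / x) := mul_comm _ _
        omega
      have hcs : num / x ≤ Int.sqrt num := (le_sqrt_iff num (num / x) hn (by omega)).mpr hcc
      have hnum : num = (num / x) * x := by
        have := mul_comm x (num / x); omega
      have hfd : PySem.Int.floordiv num (num / x) = x := by
        rw [PySem.Int.floordiv_eq_ediv_of_pos (by omega : (0:Int) < num / x)]
        have hcl : num / x * x / (num / x) = x :=
          Int.mul_ediv_cancel_left x (by omega)
        rw [hnum.symm] at hcl
        exact hcl
      refine ⟨num / x, ⟨by omega, by omega⟩, ?_, Or.inr ⟨?_, hfd.symm⟩⟩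
      · rw [PySem.Int.mod_eq_zero_iff_dvd]; exact ⟨x, hnum⟩
      · rw [hfd, Ne, PySem.Int.mod_eq_zero_iff_dvd]; exact hxodd
  · rintro ⟨i, ⟨hi2, his⟩, hdvd, hbr⟩
    have hii : i * i ≤ num := (le_sqrt_iff num i hn (by omega)).mp (by omega)
    obtain ⟨hc, hic, hcc⟩ := cof_facts num i hi2 hii hdvd
    rcases hbr with ⟨hodd, hx⟩ | ⟨hodd, hx⟩
    · subst hx
      rw [Ne, PySem.Int.mod_eq_zero_iff_dvd] at hodd
      have h2i : 2 * x ≤ num := by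
        have : x * 2 ≤ x * PySem.Int.floordiv num x :=
          mul_le_mul_of_nonneg_left (by omega) (by omega)
        omega
      have hle : x ≤ num / 2 :=
        (Int.le_ediv_iff_mul_le (by norm_num : (0:Int) < 2)).mpr (by omega)
      exact ⟨⟨by omega, by omega, by omega⟩, hdvd⟩
    · subst hx
      rw [Ne, PySem.Int.mod_eq_zero_iff_dvd] at hodd
      have h2c : 2 * PySem.Int.floordiv num i ≤ num := by
        have : 2 * PySem.Int.floordiv num i ≤ i * PySem.Int.floordiv num i :=
          mul_le_mul_of_nonneg_right (by omega) (by omega)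
        omega
      have hle : PySem.Int.floordiv num i ≤ num / 2 :=
        (Int.le_ediv_iff_mul_le (by norm_num : (0:Int) < 2)).mpr (by omega)
      have hcomm : PySem.Int.floordiv num i * i = i * PySem.Int.floordiv num i :=
        mul_comm _ _
      refine ⟨⟨by omega, by omega, by omega⟩, ?_⟩
      rw [PySem.Int.mod_eq_zero_iff_dvd]
      exact ⟨i, by omega⟩

-- A's sorted set IS B's list
theorem sorted_eq_bList (num : Int) (hn : 0 ≤ num) :
    PySem.List.sorted
      ((PySem.List.pyRange 2 (Int.sqrt num + 1) 1).foldl (fStep num) PySem.Set.empty)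
      (fun x => x) false = bList num := by
  apply PySem.List.sorted_eq_of_perm_of_pairwise_lt
  · refine (List.perm_ext_iff_of_nodup ((pairwise_bList num).imp ne_of_lt)
      (nodup_foldl_fStep num _ _ List.nodup_nil)).mpr ?_
    intro a
    rw [mem_bList_iff num a hn, mem_foldl_fStep]
    simp only [List.not_mem_nil, false_or]
  · exact pairwise_bList num

-- zeta-reduced form of port A (definitional)
theorem f_def (num : Int) :
    f num =
      (if ((PySem.List.sorted
            ((PySem.List.pyRange 2 (Int.sqrt num + 1) 1).foldl (fStep num) PySem.Set.empty)
            (fun x => x) false).length : Int) ≤ 5 then 0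
       else if 6 ≤ ((PySem.List.sorted
            ((PySem.List.pyRange 2 (Int.sqrt num + 1) 1).foldl (fStep num) PySem.Set.empty)
            (fun x => x) false).length : Int) then
         PySem.List.pyGetD (PySem.List.sorted
            ((PySem.List.pyRange 2 (Int.sqrt num + 1) 1).foldl (fStep num) PySem.Set.empty)
            (fun x => x) false) (-6) 0
       else 0) := rfl

-- ========== B-side lemmas ==========

-- primality from the absence of divisors below p
theorem int_prime_of_no_divisors (p : Int) (h2 : 2 ≤ p)
    (h : ∀ d : Int, 2 ≤ d → d < p → ¬ d ∣ p) : Prime p := by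
  rw [Int.prime_iff_natAbs_prime]
  rw [Nat.prime_def_lt]
  refine ⟨by omega, fun m hm hdvd => ?_⟩
  by_contra hne
  have hm0 : m ≠ 0 := by
    rintro rfl
    have := Nat.eq_zero_of_zero_dvd hdvd
    omega
  have hmi : (m : Int) ∣ p := by
    have : (m : Int) ∣ (p.natAbs : Int) := Int.natCast_dvd_natCast.mpr hdvd
    rwa [Int.natAbs_of_nonneg (by omega)] at this
  exact h m (by omega) (by omega) hmi

-- primality from the absence of divisors up to the square root
theorem int_prime_of_no_small (r : Int) (h2 : 2 ≤ r)
    (h : ∀ d : Int, 2 ≤ d → d * d ≤ r → ¬ d ∣ r) : Prime r := by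
  apply int_prime_of_no_divisors r h2
  intro d hd hdr hdvd
  obtain ⟨c, hc⟩ := hdvd
  have hcpos : 0 < c := by
    rcases mul_pos_iff.mp (show (0:Int) < d * c by rw [← hc]; omega) with ⟨_, h0⟩ | ⟨h0, _⟩
    · exact h0
    · omega
  have hc2 : 2 ≤ c := by
    by_contra hcon
    have hc1 : c = 1 := by omega
    rw [hc1, mul_one] at hc
    omega
  rcases le_total (d * d) r with hle | hlt
  · exact h d hd hle ⟨c, hc⟩
  · have hcd : c ≤ d := by
      by_contra hge
      have : d * d < d * c := mul_lt_mul_of_pos_left (by omega) (by omega)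
      omega
    have hcc : c * c ≤ r := by
      have h1 : c * c ≤ c * d := mul_le_mul_of_nonneg_left hcd (by omega)
      have h2' : c * d = d * c := mul_comm _ _
      omega
    exact h c hc2 hcc ⟨d, by rw [hc]; ring⟩

-- two positive primes dividing each other are equal
theorem prime_dvd_prime_eq {p q : Int} (hp : Prime p) (hq : Prime q)
    (hppos : 0 < p) (hqpos : 0 < q) (h : p ∣ q) : p = q := by
  obtain ⟨c, hc⟩ := h
  rcases hq.irreducible.isUnit_or_isUnit hc with h1 | h1
  · exact absurd h1 hp.not_unit
  · rcases Int.isUnit_iff.mp h1 with rfl | rfl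
    · omega
    · have : q = -p := by omega
      omega

-- positive divisor of p^e * t not divisible by the prime p divides t
theorem dvd_split {p x t : Int} (hp : Prime p) (e : Nat)
    (h : x ∣ p ^ e * t) (hnd : ¬ p ∣ x) : x ∣ t := by
  have hco : IsCoprime x (p ^ e) :=
    ((hp.coprime_iff_not_dvd.mpr hnd).symm).pow_right
  exact hco.dvd_of_dvd_mul_left h

-- decomposition of a positive divisor of M * p^e
theorem decomp {p : Int} (hp : Prime p) (hppos : 0 < p) (M : Int) :
    ∀ (e : Nat) (x : Int), 0 < x → x ∣ M * p ^ e →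
      ∃ (y : Int) (c : Nat), c ≤ e ∧ 0 < y ∧ y ∣ M ∧ x = y * p ^ c := by
  intro e
  induction e with
  | zero => intro x hx h; exact ⟨x, 0, le_refl 0, hx, by simpa using h, by simp⟩
  | succ e ih =>
    intro x hx h
    by_cases hpx : p ∣ x
    · obtain ⟨y', hy'⟩ := hpx
      have hy'pos : 0 < y' := by
        rcases mul_pos_iff.mp (show (0:Int) < p * y' by rw [← hy']; omega)
          with ⟨_, h0⟩ | ⟨h0, _⟩
        · exact h0
        · omega
      have hdvd : y' ∣ M * p ^ e := by
        have h1 : p * y' ∣ p * (M * p ^ e) := by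
          rw [← hy']
          have : M * p ^ (e + 1) = p * (M * p ^ e) := by ring
          rwa [this] at h
        exact (mul_dvd_mul_iff_left (by omega : p ≠ 0)).mp h1
      obtain ⟨y, c, hce, hypos, hyM, hxe⟩ := ih y' hy'pos hdvd
      exact ⟨y, c + 1, by omega, hypos, hyM, by rw [hy', hxe]; ring⟩
    · have hxM : x ∣ M := by
        have hco : IsCoprime x (p ^ (e + 1)) :=
          ((hp.coprime_iff_not_dvd.mpr hpx).symm).pow_right
        exact hco.dvd_of_dvd_mul_right h
      exact ⟨x, 0, by omega, hx, hxM, by simp⟩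

-- powers of p > 1 are injective in the exponent
theorem pow_exp_inj {p : Int} (hp : 1 < p) {k k' : Nat} (h : p ^ k = p ^ k') : k = k' := by
  rcases lt_trichotomy k k' with hlt | heq | hgt
  · exact absurd h (ne_of_lt (pow_lt_pow_right₀ hp hlt))
  · exact heq
  · exact absurd h.symm (ne_of_lt (pow_lt_pow_right₀ hp hgt))

-- cancelling powers of p between two p-free factors
theorem cancel_eq {p d d' : Int} (hp : 1 < p) (hd : ¬ p ∣ d) (hd' : ¬ p ∣ d')
    {k k' : Nat} (h : d * p ^ k = d' * p ^ k') : d = d' ∧ k = k' := by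
  have key : ∀ {a b : Int} {i j : Nat}, ¬ p ∣ a → ¬ p ∣ b → i ≤ j →
      a * p ^ i = b * p ^ j → a = b ∧ i = j := by
    intro a b i j ha hb hij heq
    obtain ⟨δ, rfl⟩ : ∃ δ, j = i + δ := ⟨j - i, by omega⟩
    have h1 : a * p ^ i = b * p ^ δ * p ^ i := by rw [heq]; ring
    have h2 : a = b * p ^ δ := mul_right_cancel₀ (pow_ne_zero _ (by omega : p ≠ 0)) h1
    cases δ with
    | zero => simp at h2; exact ⟨h2, by omega⟩
    | succ δ' =>
      exfalso
      apply ha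
      rw [h2]
      exact ⟨b * p ^ δ', by ring⟩
  rcases le_total k k' with hle | hle
  · exact key hd hd' hle h
  · obtain ⟨h1, h2⟩ := key hd' hd hle h.symm
    exact ⟨h1.symm, h2.symm⟩

-- the halving loop: odd part with its power of two
theorem bHalve_spec : ∀ (fuel : Nat) (m : Int), 1 ≤ m → m.toNat ≤ fuel →
    ∃ a : Nat, m = 2 ^ a * bHalve m fuel ∧ 1 ≤ bHalve m fuel ∧ ¬ (2:Int) ∣ bHalve m fuel := by
  intro fuel
  induction fuel with
  | zero => intro m hm hf; omega
  | succ fuel ih =>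
    intro m hm hf
    by_cases hc : PySem.Int.mod m 2 = 0 ∧ 0 < m
    · have hdvd : (2:Int) ∣ m := (PySem.Int.mod_eq_zero_iff_dvd m 2).mp hc.1
      obtain ⟨c, hcm⟩ := hdvd
      have hfd : PySem.Int.floordiv m 2 = c := by
        rw [PySem.Int.floordiv_eq_ediv_of_pos (by norm_num : (0:Int) < 2), hcm]
        exact Int.mul_ediv_cancel_left c (by norm_num)
      have hc1 : 1 ≤ c := by omega
      obtain ⟨a, ha, hpos, hodd⟩ := ih c hc1 (by omega)
      refine ⟨a + 1, ?_, ?_, ?_⟩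
      · show m = 2 ^ (a + 1) * bHalve m (fuel + 1)
        simp only [bHalve, if_pos hc, hfd]
        conv_lhs => rw [hcm, ha]
        ring
      · show 1 ≤ bHalve m (fuel + 1)
        simp only [bHalve, if_pos hc, hfd]; exact hpos
      · show ¬ (2:Int) ∣ bHalve m (fuel + 1)
        simp only [bHalve, if_pos hc, hfd]; exact hodd
    · refine ⟨0, ?_, ?_, ?_⟩ <;> simp only [bHalve, if_neg hc]
      · ring
      · exact hm
      · intro hdvd
        exact hc ⟨(PySem.Int.mod_eq_zero_iff_dvd m 2).mpr hdvd, by omega⟩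

-- the extraction loop: full p-power with a p-free remainder
theorem bExtract_spec : ∀ (fuel : Nat) (p m e : Int), 2 ≤ p → 1 ≤ m → m.toNat ≤ fuel →
    ∃ k : Nat, (bExtract p m e fuel).1 = e + k ∧ m = p ^ k * (bExtract p m e fuel).2 ∧
      ¬ p ∣ (bExtract p m e fuel).2 ∧ 1 ≤ (bExtract p m e fuel).2 ∧ (p ∣ m → 1 ≤ k) := by
  intro fuel
  induction fuel with
  | zero => intro p m e hp hm hf; omega
  | succ fuel ih =>
    intro p m e hp hm hf
    by_cases hc : PySem.Int.mod m p = 0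
    · have hdvd : p ∣ m := (PySem.Int.mod_eq_zero_iff_dvd m p).mp hc
      obtain ⟨c, hcm⟩ := hdvd
      have hfd : PySem.Int.floordiv m p = c := by
        rw [PySem.Int.floordiv_eq_ediv_of_pos (by omega : (0:Int) < p), hcm]
        exact Int.mul_ediv_cancel_left c (by omega)
      have hc1 : 1 ≤ c := by
        rcases mul_pos_iff.mp (show (0:Int) < p * c by rw [← hcm]; omega)
          with ⟨_, h0⟩ | ⟨h0, _⟩
        · omega
        · omega
      have hlt : c < m := by
        have : 2 * c ≤ p * c := mul_le_mul_of_nonneg_right (by omega) (by omega)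
        omega
      obtain ⟨k, hk1, hk2, hk3, hk4, _⟩ := ih p c (e + 1) hp hc1 (by omega)
      refine ⟨k + 1, ?_, ?_, ?_, ?_, fun _ => by omega⟩
      · show (bExtract p m e (fuel + 1)).1 = e + (k + 1 : Nat)
        simp only [bExtract, if_pos hc, hfd]
        push_cast
        omega
      · show m = p ^ (k + 1) * (bExtract p m e (fuel + 1)).2
        simp only [bExtract, if_pos hc, hfd]
        conv_lhs => rw [hcm, hk2]
        ring
      · show ¬ p ∣ (bExtract p m e (fuel + 1)).2
        simp only [bExtract, if_pos hc, hfd]; exact hk3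
      · show 1 ≤ (bExtract p m e (fuel + 1)).2
        simp only [bExtract, if_pos hc, hfd]; exact hk4
    · refine ⟨0, ?_, ?_, ?_, ?_, ?_⟩
      · simp [bExtract, if_neg hc]
      · simp [bExtract, if_neg hc]
      · simp only [bExtract, if_neg hc]
        intro hdvd; exact hc ((PySem.Int.mod_eq_zero_iff_dvd m p).mpr hdvd)
      · simp only [bExtract, if_neg hc]; exact hm
      · intro hdvd; exact absurd ((PySem.Int.mod_eq_zero_iff_dvd m p).mpr hdvd) hc

-- product of the prime-power list
def prodPE (L : List (Int × Int)) : Int := (L.map (fun pe => pe.1 ^ pe.2.toNat)).prod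

theorem prodPE_nil : prodPE [] = 1 := rfl

theorem prodPE_cons (pe : Int × Int) (L : List (Int × Int)) :
    prodPE (pe :: L) = pe.1 ^ pe.2.toNat * prodPE L := by
  simp [prodPE]

theorem prodPE_append (L M : List (Int × Int)) :
    prodPE (L ++ M) = prodPE L * prodPE M := by
  simp [prodPE]

-- the factor loop: a complete factorisation of m into increasing primes times a prime-or-one rest
theorem bFacLoop_spec : ∀ (fuel : Nat) (p m : Int) (fac : List (Int × Int)),
    3 ≤ p → ¬ (2:Int) ∣ p → 1 ≤ m →
    (∀ d : Int, 2 ≤ d → d < p → ¬ d ∣ m) →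
    (m + 1 - p).toNat ≤ fuel →
    ∃ L : List (Int × Int),
      (bFacLoop p m fac fuel).1 = fac ++ L ∧
      m = prodPE L * (bFacLoop p m fac fuel).2 ∧
      (∀ pe ∈ L, p ≤ pe.1 ∧ 1 ≤ pe.2 ∧ Prime pe.1) ∧
      (L.map Prod.fst).Pairwise (· < ·) ∧
      1 ≤ (bFacLoop p m fac fuel).2 ∧
      (1 < (bFacLoop p m fac fuel).2 →
        Prime (bFacLoop p m fac fuel).2 ∧ ∀ pe ∈ L, pe.1 < (bFacLoop p m fac fuel).2) := by
  intro fuel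
  induction fuel with
  | zero =>
    intro p m fac hp3 hpodd hm hinv hf
    have hmp : m < p := by omega
    refine ⟨[], by simp [bFacLoop], by simp [bFacLoop, prodPE_nil], by simp, by simp,
      by simp [bFacLoop]; omega, ?_⟩
    intro h1
    simp only [bFacLoop] at h1 ⊢
    refine ⟨int_prime_of_no_divisors m (by omega) ?_, by simp⟩
    intro d hd2 hdm hdvd
    exact hinv d hd2 (by omega) hdvd
  | succ fuel ih =>
    intro p m fac hp3 hpodd hm hinv hf
    by_cases hg : p * p ≤ m
    · have hmp : 3 * p ≤ m := by
        have : 3 * p ≤ p * p := mul_le_mul_of_nonneg_right (by omega) (by omega)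
        omega
      by_cases hd : PySem.Int.mod m p = 0
      · -- extract the full power of p
        have hpm : p ∣ m := (PySem.Int.mod_eq_zero_iff_dvd m p).mp hd
        obtain ⟨k, he1, he2, he3, he4, he5⟩ :=
          bExtract_spec m.toNat p m 0 (by omega) hm (le_refl _)
        have hk1 : 1 ≤ k := he5 hpm
        set m' := (bExtract p m 0 m.toNat).2 with hm'def
        have hpk1 : (1:Int) ≤ p ^ k := one_le_pow₀ (by omega)
        have hm'le : m' ≤ m := by
          have : 1 * m' ≤ p ^ k * m' := mul_le_mul_of_nonneg_right hpk1 (by omega)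
          omega
        have hprime : Prime p := by
          apply int_prime_of_no_divisors p (by omega)
          intro d hd2 hdp hdvd
          exact hinv d hd2 hdp (hdvd.trans hpm)
        have hm'dvd : m' ∣ m := ⟨p ^ k, by rw [he2]; ring⟩
        have hinv' : ∀ d : Int, 2 ≤ d → d < p + 2 → ¬ d ∣ m' := by
          intro d hd2 hdp hdvd
          rcases lt_trichotomy d p with h1 | h1 | h1
          · exact hinv d hd2 h1 (hdvd.trans hm'dvd)
          · exact he3 (h1 ▸ hdvd)
          · -- d = p + 1, even
            have hdeq : d = p + 1 := by omega
            have h2d : (2:Int) ∣ d := by omega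
            exact hinv 2 (by omega) (by omega) ((h2d.trans hdvd).trans hm'dvd)
        obtain ⟨L', hL1, hL2, hL3, hL4, hL5, hL6⟩ :=
          ih (p + 2) m' (fac ++ [(p, ((0:Int) + (k:Int)))]) (by omega) (by omega)
            he4 hinv' (by omega)
        have hrdvd : (bFacLoop (p + 2) m' (fac ++ [(p, ((0:Int) + (k:Int)))]) fuel).2 ∣ m' := by
          refine ⟨prodPE L', ?_⟩
          conv_lhs => rw [hL2]
          ring
        set r := (bFacLoop (p + 2) m' (fac ++ [(p, ((0:Int) + (k:Int)))]) fuel).2 with hrdef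
        have hres : bFacLoop p m fac (fuel + 1) =
            bFacLoop (p + 2) m' (fac ++ [(p, ((0:Int) + (k:Int)))]) fuel := by
          simp only [bFacLoop, if_pos hg, if_pos hd]
          rw [← he1, ← hm'def]
        refine ⟨(p, ((0:Int) + (k:Int))) :: L', ?_, ?_, ?_, ?_, ?_, ?_⟩
        · rw [hres, hL1]; simp
        · rw [hres]
          have hkt : ((0:Int) + (k:Int)).toNat = k := by omega
          rw [prodPE_cons]
          simp only [hkt]
          conv_lhs => rw [he2, hL2]
          rw [hrdef]
          ring
        · intro pe hpe
          rcases List.mem_cons.mp hpe with rfl | hpe'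
          · exact ⟨le_refl p, by omega, hprime⟩
          · obtain ⟨ha, hb, hc'⟩ := hL3 pe hpe'
            exact ⟨by omega, hb, hc'⟩
        · rw [List.map_cons]
          rw [List.pairwise_cons]
          refine ⟨?_, hL4⟩
          intro q hq
          obtain ⟨pe, hpe, rfl⟩ := List.mem_map.mp hq
          have := (hL3 pe hpe).1
          omega
        · rw [hres, ← hrdef]; exact hL5
        · rw [hres, ← hrdef]
          intro h1
          obtain ⟨hrp, hrgt⟩ := hL6 h1
          refine ⟨hrp, ?_⟩
          intro pe hpe
          rcases List.mem_cons.mp hpe with rfl | hpe'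
          · -- p < r
            have hge : ¬ r < p := fun hlt =>
              hinv r (by omega) hlt (hrdvd.trans hm'dvd)
            have hne : r ≠ p := fun heq => he3 (heq ▸ hrdvd)
            simp only
            omega
          · exact hrgt pe hpe'
      · -- p does not divide m
        have hinv' : ∀ d : Int, 2 ≤ d → d < p + 2 → ¬ d ∣ m := by
          intro d hd2 hdp hdvd
          rcases lt_trichotomy d p with h1 | h1 | h1
          · exact hinv d hd2 h1 hdvd
          · exact hd ((PySem.Int.mod_eq_zero_iff_dvd m p).mpr (h1 ▸ hdvd))
          · have h2d : (2:Int) ∣ d := by omega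
            exact hinv 2 (by omega) (by omega) (h2d.trans hdvd)
        obtain ⟨L, hL1, hL2, hL3, hL4, hL5, hL6⟩ :=
          ih (p + 2) m fac (by omega) (by omega) hm hinv' (by omega)
        have hres : bFacLoop p m fac (fuel + 1) = bFacLoop (p + 2) m fac fuel := by
          simp only [bFacLoop, if_pos hg, if_neg hd]
        refine ⟨L, by rw [hres]; exact hL1, by rw [hres]; exact hL2, ?_, hL4,
          by rw [hres]; exact hL5, by rw [hres]; exact hL6⟩
        intro pe hpe
        obtain ⟨ha, hb, hc'⟩ := hL3 pe hpe
        exact ⟨by omega, hb, hc'⟩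
    · -- exit: p * p > m
      have hres : bFacLoop p m fac (fuel + 1) = (fac, m) := by
        simp only [bFacLoop, if_neg hg]
      refine ⟨[], by rw [hres]; simp, by rw [hres, prodPE_nil]; ring, by simp, by simp,
        by rw [hres]; exact hm, ?_⟩
      intro h1
      rw [hres] at h1 ⊢
      refine ⟨int_prime_of_no_small m (by omega) ?_, by simp⟩
      intro d hd2 hdd hdvd
      have hdp : d < p := by
        by_contra hge
        have : p * p ≤ d * d := mul_le_mul (by omega) (by omega) (by omega) (by omega)
        omega
      exact hinv d hd2 hdp hdvd

-- the innermost power-appending loop, flattened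
theorem inner_fold (p : Int) : ∀ (l : List Int) (new : List Int) (x : Int),
    (l.foldl (fun st _ => (st.1 ++ [st.2], st.2 * p)) (new, x)).1 =
      new ++ (List.range l.length).map (fun k => x * p ^ k) := by
  intro l
  induction l with
  | nil => intro new x; simp
  | cons h t ih =>
    intro new x
    rw [List.foldl_cons, ih]
    rw [List.length_cons, List.range_succ_eq_map]
    rw [List.append_assoc]
    simp only [List.map_cons, List.map_map, pow_zero, mul_one, List.singleton_append]
    congr 1
    congr 1
    apply List.map_congr_left
    intro a _
    simp only [Function.comp_apply, pow_succ]
    ring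

-- one generation pass, as a flatMap
theorem gen_step_eq (p e : Int) (divs : List Int) (he : 0 ≤ e) :
    divs.foldl (fun new d =>
        ((PySem.List.pyRange 0 (e + 1) 1).foldl
          (fun st _ => (st.1 ++ [st.2], st.2 * p)) (new, d)).1) [] =
      divs.flatMap (fun d => (List.range (e.toNat + 1)).map (fun k => d * p ^ k)) := by
  have hlen : (PySem.List.pyRange 0 (e + 1) 1).length = e.toNat + 1 := by
    rw [PySem.List.length_pyRange_one]
    omega
  have hbody : (fun (new : List Int) (d : Int) =>
      ((PySem.List.pyRange 0 (e + 1) 1).foldl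
        (fun st _ => (st.1 ++ [st.2], st.2 * p)) (new, d)).1) =
      fun new d => new ++ (List.range (e.toNat + 1)).map (fun k => d * p ^ k) := by
    funext new d
    rw [inner_fold, hlen]
  rw [hbody, PySem.List.foldl_append_eq_flatMap]
  simp

-- nodup is preserved by one generation pass
theorem gen_nodup {p : Int} (hp : 1 < p) (e : Nat) :
    ∀ (divs : List Int), (∀ d ∈ divs, 0 < d ∧ ¬ p ∣ d) → divs.Nodup →
      (divs.flatMap (fun d => (List.range (e + 1)).map (fun k => d * p ^ k))).Nodup := by
  intro divs
  induction divs with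
  | nil => intro _ _; simp
  | cons d ds ih =>
    intro hall hnd
    rw [List.flatMap_cons, List.nodup_append]
    obtain ⟨hdpos, hdfree⟩ := hall d (by simp)
    refine ⟨?_, ih (fun x hx => hall x (by simp [hx])) (List.nodup_cons.mp hnd).2, ?_⟩
    · refine List.Nodup.map ?_ List.nodup_range
      intro k k' hkk
      have h1 : p ^ k = p ^ k' := by
        have := mul_left_cancel₀ (by omega : d ≠ 0) hkk
        exact this
      exact pow_exp_inj hp h1
    · intro a ha b hb
      obtain ⟨k, _, rfl⟩ := List.mem_map.mp ha
      obtain ⟨d', hd', hb'⟩ := List.mem_flatMap.mp hb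
      obtain ⟨k', _, rfl⟩ := List.mem_map.mp hb'
      intro heq
      obtain ⟨hddd, _⟩ := cancel_eq hp hdfree (hall d' (by simp [hd'])).2 heq
      exact (List.nodup_cons.mp hnd).1 (hddd ▸ hd')

-- the full generation fold: membership and nodup
theorem bGen_fold_spec : ∀ (fac : List (Int × Int)) (divs : List Int) (M : Int),
    0 < M →
    (∀ x, x ∈ divs ↔ 0 < x ∧ x ∣ M) → divs.Nodup →
    (∀ pe ∈ fac, Prime pe.1 ∧ 1 < pe.1 ∧ 0 ≤ pe.2 ∧ ¬ pe.1 ∣ M) →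
    (fac.map Prod.fst).Pairwise (· < ·) →
    (∀ x, x ∈ fac.foldl (fun divs pe =>
        divs.foldl (fun new d =>
          ((PySem.List.pyRange 0 (pe.2 + 1) 1).foldl
            (fun st _ => (st.1 ++ [st.2], st.2 * pe.1)) (new, d)).1) []) divs ↔
      0 < x ∧ x ∣ M * prodPE fac) ∧
    (fac.foldl (fun divs pe =>
        divs.foldl (fun new d =>
          ((PySem.List.pyRange 0 (pe.2 + 1) 1).foldl
            (fun st _ => (st.1 ++ [st.2], st.2 * pe.1)) (new, d)).1) []) divs).Nodup := by
  intro fac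
  induction fac with
  | nil =>
    intro divs M hM hmem hnd _ _
    refine ⟨fun x => ?_, hnd⟩
    rw [prodPE_nil, mul_one]
    exact hmem x
  | cons pe fac' ih =>
    intro divs M hM hmem hnd hfac hpair
    obtain ⟨hprime, hgt1, hbnn, hnotdvd⟩ := hfac pe (by simp)
    rw [List.foldl_cons, gen_step_eq pe.1 pe.2 divs hbnn]
    set divs' := divs.flatMap
      (fun d => (List.range (pe.2.toNat + 1)).map (fun k => d * pe.1 ^ k)) with hdivs'
    have hmem' : ∀ x, x ∈ divs' ↔ 0 < x ∧ x ∣ M * pe.1 ^ pe.2.toNat := by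
      intro x
      rw [hdivs', List.mem_flatMap]
      constructor
      · rintro ⟨d, hd, hx⟩
        obtain ⟨k, hk, rfl⟩ := List.mem_map.mp hx
        obtain ⟨hdpos, hdM⟩ := (hmem d).mp hd
        rw [List.mem_range] at hk
        exact ⟨mul_pos hdpos (pow_pos (by omega) k),
          mul_dvd_mul hdM (pow_dvd_pow pe.1 (by omega))⟩
      · rintro ⟨hxpos, hxdvd⟩
        obtain ⟨y, c, hce, hypos, hyM, rfl⟩ := decomp hprime (by omega) M pe.2.toNat x hxpos hxdvd
        exact ⟨y, (hmem y).mpr ⟨hypos, hyM⟩,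
          List.mem_map.mpr ⟨c, List.mem_range.mpr (by omega), rfl⟩⟩
    have hnd' : divs'.Nodup := by
      apply gen_nodup hgt1
      · intro d hd
        obtain ⟨hdpos, hdM⟩ := (hmem d).mp hd
        exact ⟨hdpos, fun hpd => hnotdvd (hpd.trans hdM)⟩
      · exact hnd
    have hfac' : ∀ q ∈ fac', Prime q.1 ∧ 1 < q.1 ∧ 0 ≤ q.2 ∧ ¬ q.1 ∣ M * pe.1 ^ pe.2.toNat := by
      intro q hq
      obtain ⟨hq1, hq2, hq3, hq4⟩ := hfac q (by simp [hq])
      refine ⟨hq1, hq2, hq3, ?_⟩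
      intro hqd
      rcases hq1.dvd_mul.mp hqd with h1 | h1
      · exact hq4 h1
      · have hqp : q.1 ∣ pe.1 := hq1.dvd_of_dvd_pow h1
        have : q.1 = pe.1 := prime_dvd_prime_eq hq1 hprime (by omega) (by omega) hqp
        have hlt : pe.1 < q.1 := by
          rw [List.map_cons, List.pairwise_cons] at hpair
          exact hpair.1 q.1 (List.mem_map.mpr ⟨q, hq, rfl⟩)
        omega
    have hpair' : (fac'.map Prod.fst).Pairwise (· < ·) := by
      rw [List.map_cons, List.pairwise_cons] at hpair
      exact hpair.2
    obtain ⟨hm2, hn2⟩ := ih divs' (M * pe.1 ^ pe.2.toNat)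
      (mul_pos hM (pow_pos (by omega) _)) hmem' hnd' hfac' hpair'
    refine ⟨fun x => ?_, hn2⟩
    rw [hm2 x, prodPE_cons]
    constructor
    · rintro ⟨h1, h2⟩
      exact ⟨h1, by rw [show M * (pe.1 ^ pe.2.toNat * prodPE fac') =
        M * pe.1 ^ pe.2.toNat * prodPE fac' by ring]; exact h2⟩
    · rintro ⟨h1, h2⟩
      exact ⟨h1, by rw [show M * pe.1 ^ pe.2.toNat * prodPE fac' =
        M * (pe.1 ^ pe.2.toNat * prodPE fac') by ring]; exact h2⟩

-- characterisation of bGen of the computed factorisation: all divisors of the odd part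
theorem divs_char (num : Int) (h1 : 1 ≤ num) :
    (∀ x, x ∈ bGen (if 1 < (bFacLoop 3 (bHalve num (num.toNat + 1)) [] ((bHalve num (num.toNat + 1)).toNat + 1)).2 then
        (bFacLoop 3 (bHalve num (num.toNat + 1)) [] ((bHalve num (num.toNat + 1)).toNat + 1)).1 ++
          [((bFacLoop 3 (bHalve num (num.toNat + 1)) [] ((bHalve num (num.toNat + 1)).toNat + 1)).2, (1:Int))]
      else (bFacLoop 3 (bHalve num (num.toNat + 1)) [] ((bHalve num (num.toNat + 1)).toNat + 1)).1) ↔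
      0 < x ∧ x ∣ bHalve num (num.toNat + 1)) ∧
    (bGen (if 1 < (bFacLoop 3 (bHalve num (num.toNat + 1)) [] ((bHalve num (num.toNat + 1)).toNat + 1)).2 then
        (bFacLoop 3 (bHalve num (num.toNat + 1)) [] ((bHalve num (num.toNat + 1)).toNat + 1)).1 ++
          [((bFacLoop 3 (bHalve num (num.toNat + 1)) [] ((bHalve num (num.toNat + 1)).toNat + 1)).2, (1:Int))]
      else (bFacLoop 3 (bHalve num (num.toNat + 1)) [] ((bHalve num (num.toNat + 1)).toNat + 1)).1)).Nodup := by
  obtain ⟨a, ham, hm1, hmodd⟩ := bHalve_spec (num.toNat + 1) num h1 (by omega)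
  set m := bHalve num (num.toNat + 1) with hmdef
  have hinv : ∀ d : Int, 2 ≤ d → d < 3 → ¬ d ∣ m := by
    intro d hd2 hd3 hdvd
    have : d = 2 := by omega
    exact hmodd (this ▸ hdvd)
  obtain ⟨L, hL1, hL2, hL3, hL4, hL5, hL6⟩ :=
    bFacLoop_spec (m.toNat + 1) 3 m [] (by omega) (by omega) hm1 hinv (by omega)
  set r := (bFacLoop 3 m [] (m.toNat + 1)).2 with hrdef
  rw [List.nil_append] at hL1
  have hmemdivs : ∀ x : Int, x ∈ ([1] : List Int) ↔ 0 < x ∧ x ∣ 1 := by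
    intro x
    simp only [List.mem_singleton]
    constructor
    · rintro rfl; exact ⟨one_pos, dvd_refl 1⟩
    · rintro ⟨hx, hd⟩; exact Int.eq_one_of_dvd_one (by omega) hd
  have hLfacts : ∀ pe ∈ L, Prime pe.1 ∧ 1 < pe.1 ∧ 0 ≤ pe.2 ∧ ¬ pe.1 ∣ (1:Int) := by
    intro pe hpe
    obtain ⟨ha, hb, hc⟩ := hL3 pe hpe
    refine ⟨hc, by omega, by omega, ?_⟩
    intro hd
    have := Int.eq_one_of_dvd_one (by omega) hd
    omega
  by_cases hr : 1 < r
  · obtain ⟨hrprime, hrgt⟩ := hL6 hr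
    have hfacts : ∀ pe ∈ L ++ [(r, (1:Int))],
        Prime pe.1 ∧ 1 < pe.1 ∧ 0 ≤ pe.2 ∧ ¬ pe.1 ∣ (1:Int) := by
      intro pe hpe
      rcases List.mem_append.mp hpe with h | h
      · exact hLfacts pe h
      · rw [List.mem_singleton] at h
        subst h
        refine ⟨hrprime, by omega, by omega, ?_⟩
        intro hd
        have := Int.eq_one_of_dvd_one (by omega) hd
        omega
    have hpair : ((L ++ [(r, (1:Int))]).map Prod.fst).Pairwise (· < ·) := by
      rw [List.map_append, List.pairwise_append]
      refine ⟨hL4, by simp, ?_⟩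
      intro q hq b hb
      rw [List.map_singleton, List.mem_singleton] at hb
      subst hb
      obtain ⟨pe, hpe, rfl⟩ := List.mem_map.mp hq
      exact hrgt pe hpe
    obtain ⟨hmm, hnn⟩ := bGen_fold_spec (L ++ [(r, (1:Int))]) [1] 1 one_pos hmemdivs
      (by simp) hfacts hpair
    rw [hL1, if_pos hr]
    refine ⟨fun x => ?_, hnn⟩
    unfold bGen
    rw [hmm x, one_mul, prodPE_append]
    have : prodPE [(r, (1:Int))] = r := by simp [prodPE]
    rw [this, ← hL2]
  · have hreq : r = 1 := by omega
    obtain ⟨hmm, hnn⟩ := bGen_fold_spec L [1] 1 one_pos hmemdivs (by simp) hLfacts hL4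
    rw [hL1, if_neg hr]
    refine ⟨fun x => ?_, hnn⟩
    unfold bGen
    have hPL : prodPE L = m := by
      conv_rhs => rw [hL2, hreq]
      rw [mul_one]
    rw [hmm x, one_mul, hPL]

-- the filtered generated list has exactly bList's membership
theorem mem_filter_iff_bList (num x : Int)
    (m : Int) (a : Nat) (ham : num = 2 ^ a * m) (hmodd : ¬ (2:Int) ∣ m)
    (divs : List Int) (hmem : ∀ y, y ∈ divs ↔ 0 < y ∧ y ∣ m) :
    x ∈ divs.filter (fun d => decide (3 ≤ d ∧ d ≤ PySem.Int.floordiv num 2)) ↔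
      x ∈ bList num := by
  unfold bList
  rw [List.mem_filter, List.mem_filter, hmem x,
    PySem.List.mem_pyRange_iff_of_pos (by norm_num : (0:Int) < 2)]
  simp only [decide_eq_true_iff,
    PySem.Int.floordiv_eq_ediv_of_pos (by norm_num : (0:Int) < 2)]
  constructor
  · rintro ⟨⟨hxpos, hxm⟩, hx3, hxle⟩
    have hmnum : m ∣ num := ⟨2 ^ a, by rw [ham]; ring⟩
    have hxodd : ¬ (2:Int) ∣ x := fun h2x => hmodd (h2x.trans hxm)
    refine ⟨⟨hx3, by omega, by omega⟩, ?_⟩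
    rw [PySem.Int.mod_eq_zero_iff_dvd]
    exact hxm.trans hmnum
  · rintro ⟨⟨hx3, hxlt, hxpar⟩, hdvd⟩
    rw [PySem.Int.mod_eq_zero_iff_dvd] at hdvd
    have hxodd : ¬ (2:Int) ∣ x := by omega
    have hxm : x ∣ m := dvd_split Int.prime_two a (by rw [← ham]; exact hdvd) hxodd
    exact ⟨⟨by omega, hxm⟩, hx3, by omega⟩

-- B's sorted filtered divisors ARE bList
theorem sortedB_eq_bList (num : Int) (h1 : 1 ≤ num) :
    PySem.List.sorted
      ((bGen (if 1 < (bFacLoop 3 (bHalve num (num.toNat + 1)) [] ((bHalve num (num.toNat + 1)).toNat + 1)).2 then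
          (bFacLoop 3 (bHalve num (num.toNat + 1)) [] ((bHalve num (num.toNat + 1)).toNat + 1)).1 ++
            [((bFacLoop 3 (bHalve num (num.toNat + 1)) [] ((bHalve num (num.toNat + 1)).toNat + 1)).2, (1:Int))]
        else (bFacLoop 3 (bHalve num (num.toNat + 1)) [] ((bHalve num (num.toNat + 1)).toNat + 1)).1)).filter
        (fun d => decide (3 ≤ d ∧ d ≤ PySem.Int.floordiv num 2)))
      (fun x => x) false = bList num := by
  obtain ⟨a, ham, hm1, hmodd⟩ := bHalve_spec (num.toNat + 1) num h1 (by omega)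
  obtain ⟨hmemg, hndg⟩ := divs_char num h1
  apply PySem.List.sorted_eq_of_perm_of_pairwise_lt
  · refine (List.perm_ext_iff_of_nodup ((pairwise_bList num).imp ne_of_lt)
      (hndg.filter _)).mpr ?_
    intro x
    rw [mem_filter_iff_bList num x (bHalve num (num.toNat + 1)) a ham hmodd _ hmemg]
  · exact pairwise_bList num

-- zeta-reduced form of port B (definitional)
theorem f_alt_def (num : Int) :
    f_alt num =
      (if ((PySem.List.sorted
            ((bGen (if 1 < (bFacLoop 3 (bHalve num (num.toNat + 1)) [] ((bHalve num (num.toNat + 1)).toNat + 1)).2 then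
                (bFacLoop 3 (bHalve num (num.toNat + 1)) [] ((bHalve num (num.toNat + 1)).toNat + 1)).1 ++
                  [((bFacLoop 3 (bHalve num (num.toNat + 1)) [] ((bHalve num (num.toNat + 1)).toNat + 1)).2, (1:Int))]
              else (bFacLoop 3 (bHalve num (num.toNat + 1)) [] ((bHalve num (num.toNat + 1)).toNat + 1)).1)).filter
              (fun d => decide (3 ≤ d ∧ d ≤ PySem.Int.floordiv num 2)))
            (fun x => x) false).length : Int) < 6 then 0
       else PySem.List.pyGetD (PySem.List.sorted
            ((bGen (if 1 < (bFacLoop 3 (bHalve num (num.toNat + 1)) [] ((bHalve num (num.toNat + 1)).toNat + 1)).2 then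
                (bFacLoop 3 (bHalve num (num.toNat + 1)) [] ((bHalve num (num.toNat + 1)).toNat + 1)).1 ++
                  [((bFacLoop 3 (bHalve num (num.toNat + 1)) [] ((bHalve num (num.toNat + 1)).toNat + 1)).2, (1:Int))]
              else (bFacLoop 3 (bHalve num (num.toNat + 1)) [] ((bHalve num (num.toNat + 1)).toNat + 1)).1)).filter
              (fun d => decide (3 ≤ d ∧ d ≤ PySem.Int.floordiv num 2)))
            (fun x => x) false) (-6) 0) := rfl

-- ===== VERDICT (by name: the statement is the Claim_ definition above) =====
theorem f_spec : Claim_equal_f := by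
  intro num _ hpre
  unfold Spec_f
  by_cases h1 : 1 ≤ num
  · rw [f_def, f_alt_def, sorted_eq_bList num hpre, sortedB_eq_bList num h1]
    split_ifs <;> first | rfl | omega
  · have : num = 0 := by unfold Pre_f at hpre; omega
    subst this
    decide

@[simp] theorem f_raises : Claim_raises_f := by
  unfold Claim_raises_f
  exact ⟨fun num _ h hp => by unfold Raises_f at h; unfold Pre_f at hp; omega, by decide⟩
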